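-- pv_equiv track=rewrite | github.com/YuseonChoi/algorithm-using-python | Programmers/lifeboat.py | solution
-- ===== SOURCE A (Python) =====
-- def solution(people, limit):
--     cnt = 0   # 구명보트 수
--     people = sorted(people)
--     while people:
--         if len(people) == 1:
--             cnt += 1
--             break
--         if people[0] + people[-1] > limit:
--             people.pop()
--             cnt += 1
--         else:
--             people.pop(0)
--             people.pop()
--             cnt += 1
--     return cnt
-- ===== SOURCE B (Python) =====
-- def solution(people, limit):
--     ps = sorted(people)
--     i, j, pairs = 0, len(ps) - 1, 0
--     while i < j:
--         if ps[i] + ps[j] <= limit: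
--             pairs += 1
--             i += 1
--         j -= 1
--     return len(ps) - pairs
-- ===== Notes on version B (the rewrite author's own statement) =====
-- stated objective: faster
-- what changed: Replaced the pop(0)/pop() loop on a shrinking list (each pop(0) is O(n)) by an index-based two-pointer scan over the sorted list that counts pairs and returns len - pairs.
import Mathlib
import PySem

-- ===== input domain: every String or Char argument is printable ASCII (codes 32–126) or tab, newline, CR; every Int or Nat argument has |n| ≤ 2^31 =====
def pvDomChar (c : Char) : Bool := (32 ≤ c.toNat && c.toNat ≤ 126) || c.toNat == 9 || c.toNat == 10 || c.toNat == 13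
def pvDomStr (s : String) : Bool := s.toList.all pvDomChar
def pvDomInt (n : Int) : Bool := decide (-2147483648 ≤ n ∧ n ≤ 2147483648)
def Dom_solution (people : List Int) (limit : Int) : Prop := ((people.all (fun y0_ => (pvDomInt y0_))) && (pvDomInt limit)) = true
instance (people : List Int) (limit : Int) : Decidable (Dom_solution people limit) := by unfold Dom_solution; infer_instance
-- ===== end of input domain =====

-- B replaces A's pop(0)/pop() loop on a shrinking list by a two-pointer index scan over the
-- sorted list that counts pairs and returns len - pairs (faster; A mutates only its local copy).

-- ===== PORT A =====
-- A's while loop on the sorted list: people[-1] is getLastD 0 (list nonempty in both uses),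
-- pop() drops the last element (dropLast), pop(0) drops the first; cnt += 1 each turn.
def aloop (limit : Int) : List Int → Int
  | [] => 0
  | [_] => 1
  | x :: y :: rest =>
    if x + (x :: y :: rest).getLastD 0 > limit then
      1 + aloop limit (x :: y :: rest).dropLast
    else
      1 + aloop limit (y :: rest).dropLast
termination_by xs => xs.length
decreasing_by
  all_goals simp [List.length_dropLast]

def solution (people : List Int) (limit : Int) : Int :=
  aloop limit (PySem.List.sorted people (fun x => x) false)

-- ===== PORT B =====
-- B's while loop on the index pair (i, j); i and j are always in range (0 ≤ i < j ≤ len-1),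
-- so plain getD is an exact port of ps[i] / ps[j].
def bpairs (xs : List Int) (limit : Int) (i j : Nat) : Int :=
  if i < j then
    if xs.getD i 0 + xs.getD j 0 ≤ limit then 1 + bpairs xs limit (i + 1) (j - 1)
    else bpairs xs limit i (j - 1)
  else 0
termination_by j - i
decreasing_by all_goals omega

def solution_alt (people : List Int) (limit : Int) : Int :=
  let ps := PySem.List.sorted people (fun x => x) false
  (ps.length : Int) - bpairs ps limit 0 (ps.length - 1)

-- ===== PRECONDITION & SPEC =====
def Spec_solution (people : List Int) (limit : Int) (out : Int) : Prop := out = solution_alt people limit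
instance (people : List Int) (limit : Int) (out : Int) : Decidable (Spec_solution people limit out) := by unfold Spec_solution; infer_instance

-- ===== CLAIM (what is proved, stated in full; the proofs are below) =====
def Claim_equal_solution : Prop := ∀ (people : List Int) (limit : Int), Dom_solution people limit → Spec_solution people limit (solution people limit)

-- ===== LEMMAS AND PROOFS =====

theorem seg_len (xs : List Int) (i j : Nat) (hj : j < xs.length) :
    ((xs.drop i).take (j+1-i)).length = j+1-i := by
  simp [List.length_take, List.length_drop]; omega

theorem getLastD_take_drop (xs : List Int) (a b : Nat) (hb : 0 < b) (hlen : a + b ≤ xs.length) :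
    ((xs.drop a).take b).getLastD 0 = xs[a+b-1]'(by omega) := by
  have hl : ((xs.drop a).take b).length = b := by simp [List.length_take, List.length_drop]; omega
  rw [List.getLastD_eq_getLast?, List.getLast?_eq_getElem?, hl]
  rw [List.getElem?_take_of_lt (by omega), List.getElem?_drop]
  rw [show a + (b - 1) = a + b - 1 from by omega]
  rw [List.getElem?_eq_getElem (by omega)]
  rfl

theorem aloop_nil (limit : Int) : aloop limit [] = 0 := by rw [aloop]

theorem aloop_single (limit x : Int) : aloop limit [x] = 1 := by rw [aloop]

theorem aloop_cons2 (limit x y : Int) (rest : List Int) :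
    aloop limit (x :: y :: rest) =
      if x + (x :: y :: rest).getLastD 0 > limit then
        1 + aloop limit (x :: y :: rest).dropLast
      else 1 + aloop limit ((y :: rest).dropLast) := by
  rw [aloop]

-- A's loop on the segment xs[i..j] equals the segment length minus B's pair count on (i, j).
theorem aloop_eq_sub_bpairs (limit : Int) (xs : List Int) :
    ∀ (k i j : Nat), j < xs.length → j + 1 - i = k →
      aloop limit ((xs.drop i).take (j + 1 - i)) = ((j + 1 - i : Nat) : Int) - bpairs xs limit i j := by
  intro k
  induction k using Nat.strong_induction_on with
  | _ k ih =>
  intro i j hj hk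
  rcases lt_trichotomy i j with hij | rfl | hij
  · -- i < j
    have hi : i < xs.length := by omega
    have hcons : xs.drop i = xs[i] :: xs.drop (i+1) := (List.getElem_cons_drop (h := hi)).symm
    have hseg : (xs.drop i).take (j+1-i) = xs[i] :: (xs.drop (i+1)).take (j-i) := by
      rw [hcons, show j+1-i = (j-i)+1 from by omega, List.take_succ_cons]
    have hlen2 : ((xs.drop (i+1)).take (j-i)).length = j-i := by
      simp [List.length_take, List.length_drop]; omega
    obtain ⟨b, t, hbt⟩ : ∃ b t, (xs.drop (i+1)).take (j-i) = b :: t := by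
      cases hc : (xs.drop (i+1)).take (j-i) with
      | nil => rw [hc] at hlen2; simp at hlen2; omega
      | cons b t => exact ⟨b, t, rfl⟩
    have he : xs[i] :: b :: t = (xs.drop i).take (j+1-i) := by rw [hseg, hbt]
    have hlast : (xs[i] :: b :: t).getLastD 0 = xs[j] := by
      rw [he, getLastD_take_drop xs i (j+1-i) (by omega) (by omega)]
      congr 1
      omega
    have hdl1 : (xs[i] :: b :: t).dropLast = (xs.drop i).take (j-i) := by
      rw [he, List.dropLast_eq_take, seg_len xs i j hj, List.take_take]
      congr 1; omega
    have hdl2 : (b :: t).dropLast = (xs.drop (i+1)).take (j-i-1) := by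
      rw [← hbt, List.dropLast_eq_take, hlen2, List.take_take]
      congr 1; omega
    rw [hseg, hbt, aloop_cons2, hlast, hdl1, hdl2]
    have hgi : xs.getD i 0 = xs[i] := List.getD_eq_getElem xs 0 hi
    have hgj : xs.getD j 0 = xs[j] := List.getD_eq_getElem xs 0 hj
    by_cases hcond : xs[i] + xs[j] > limit
    · rw [if_pos hcond]
      have hb : bpairs xs limit i j = bpairs xs limit i (j-1) := by
        rw [bpairs, if_pos hij, if_neg (by rw [hgi, hgj]; omega)]
      have ih1 := ih (k-1) (by omega) i (j-1) (by omega) (by omega)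
      rw [show j-1+1-i = j-i from by omega] at ih1
      rw [ih1, hb]
      omega
    · rw [if_neg hcond]
      have hb : bpairs xs limit i j = 1 + bpairs xs limit (i+1) (j-1) := by
        rw [bpairs, if_pos hij, if_pos (by rw [hgi, hgj]; omega)]
      have ih1 := ih (k-2) (by omega) (i+1) (j-1) (by omega) (by omega)
      rw [show j-1+1-(i+1) = j-i-1 from by omega] at ih1
      rw [ih1, hb]
      omega
  · -- i = j : a single remaining element, one boat
    have hcons : xs.drop i = xs[i] :: xs.drop (i+1) := (List.getElem_cons_drop (h := hj)).symm
    rw [show i+1-i = 1 from by omega, hcons, List.take_succ_cons, List.take_zero]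
    rw [bpairs, if_neg (by omega), aloop_single]
    norm_num
  · -- i > j : empty segment
    rw [show j+1-i = 0 from by omega, List.take_zero]
    rw [bpairs, if_neg (by omega), aloop_nil]
    norm_num

theorem main_eq (people : List Int) (limit : Int) :
    solution people limit = solution_alt people limit := by
  unfold solution solution_alt
  set s := PySem.List.sorted people (fun x => x) false with hs
  show aloop limit s = (s.length : Int) - bpairs s limit 0 (s.length - 1)
  cases hn : s.length with
  | zero =>
    have hnil : s = [] := List.eq_nil_of_length_eq_zero hn
    rw [hnil, aloop_nil, bpairs]
    norm_num
  | succ n =>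
    have h := aloop_eq_sub_bpairs limit s (n+1) 0 n (by omega) (by omega)
    rw [List.drop_zero, show n+1-0 = n+1 from by omega] at h
    rw [show n+1 = s.length from hn.symm, List.take_length] at h
    rw [h, hn]
    norm_num

-- ===== VERDICT (by name: the statement is the Claim_ definition above) =====
theorem solution_spec : Claim_equal_solution := by
  intro people limit _
  unfold Spec_solution
  exact main_eq people limit
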